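-- pv_equiv track=rewrite | github.com/saezlab/corneto | corneto/methods/carnival.py | _str_state
-- ===== SOURCE A (Python) =====
-- def _str_state(state, max_steps=3):
--     v, path = state
--     nodes = []
--     n_steps = len(path) - 1
--     skip = False
--     for i, (k, v) in enumerate(path.items()):
--         if i < n_steps and skip:
--             continue
--         pos, val, edge = v
--         if max_steps is not None and i >= max_steps and i < n_steps:
--             nodes.append("...")
--             skip = True
--         else:
--             if val > 0:
--                 nodes.append(f"+{k}")
--             else:
--                 nodes.append(f"-{k}")
--     return " -> ".join(nodes)
-- ===== SOURCE B (Python) =====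
-- def _str_state(state, max_steps=3):
--     v, path = state
--     formatted = [f"+{k}" if v[1] > 0 else f"-{k}" for k, v in path.items()]
--     n = len(formatted)
--     if max_steps is not None:
--         m = max(max_steps, 0)
--         if m < n - 1:
--             formatted = formatted[:m] + ["..."] + [formatted[-1]]
--     return " -> ".join(formatted)
-- ===== Notes on version B (the rewrite author's own statement) =====
-- stated objective: simpler
-- what changed: B formats every node in one comprehension and then truncates by slicing (prefix + '...' + last element) instead of A's stateful single pass with a running skip flag.
import Mathlib
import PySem

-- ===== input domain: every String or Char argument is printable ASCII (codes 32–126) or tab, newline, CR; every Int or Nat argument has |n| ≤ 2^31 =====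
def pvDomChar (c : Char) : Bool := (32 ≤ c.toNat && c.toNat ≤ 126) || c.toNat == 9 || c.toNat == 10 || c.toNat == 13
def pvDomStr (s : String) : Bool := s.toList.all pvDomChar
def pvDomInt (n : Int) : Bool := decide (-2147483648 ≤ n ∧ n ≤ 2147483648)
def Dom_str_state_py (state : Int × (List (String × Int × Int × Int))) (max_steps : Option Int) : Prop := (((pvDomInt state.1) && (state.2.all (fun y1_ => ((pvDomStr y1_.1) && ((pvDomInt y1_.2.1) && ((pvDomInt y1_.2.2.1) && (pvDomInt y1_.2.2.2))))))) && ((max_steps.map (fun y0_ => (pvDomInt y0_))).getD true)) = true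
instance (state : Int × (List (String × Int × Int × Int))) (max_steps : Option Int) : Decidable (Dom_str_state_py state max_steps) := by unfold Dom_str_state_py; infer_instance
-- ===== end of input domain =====

-- B formats all nodes in one comprehension and truncates by slicing instead of A's skip-flag pass; same cost, simpler shape.


-- ===== PORT A =====
-- the loop's truncation test "max_steps is not None and i >= max_steps and i < n_steps"
def pvTrig (n_steps : Int) (ms? : Option Int) (i : Int) : Bool :=
  match ms? with
  | some m => decide (i ≥ m ∧ i < n_steps)
  | none => false

-- one loop step of A: acc = (nodes, skip), ikv = (i, (k, (pos, val, edge)))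
def pvStepA (n_steps : Int) (max_steps : Option Int)
    (acc : List String × Bool) (ikv : Int × String × Int × Int × Int) :
    List String × Bool :=
  let i := ikv.1
  let k := ikv.2.1
  let v := ikv.2.2
  if i < n_steps ∧ acc.2 then acc
  else if pvTrig n_steps max_steps i then (acc.1 ++ ["..."], true)
  else if v.2.1 > 0 then (acc.1 ++ ["+" ++ k], acc.2)
  else (acc.1 ++ ["-" ++ k], acc.2)

def str_state_py (state : Int × (List (String × Int × Int × Int))) (max_steps : Option Int) : String :=
  let path := state.2
  let n_steps : Int := (path.length : Int) - 1
  let r := (PySem.List.enumerate path 0).foldl (pvStepA n_steps max_steps) ([], false)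
  PySem.Str.join " -> " r.1

-- ===== PORT B =====
def pvFmt (kv : String × Int × Int × Int) : String :=
  if kv.2.2.1 > 0 then "+" ++ kv.1 else "-" ++ kv.1

def str_state_py_alt (state : Int × (List (String × Int × Int × Int))) (max_steps : Option Int) : String :=
  let path := state.2
  let formatted := path.map pvFmt
  let n : Int := (formatted.length : Int)
  let nodes :=
    match max_steps with
    | some ms =>
      let m := max ms 0
      if m < n - 1 then
        -- formatted[:m] + ["..."] + [formatted[-1]]; pyGet? cannot be none here (n ≥ 2), getD is the Option unwrap
        PySem.List.slice formatted none (some m) ++ ["..."] ++ [(PySem.List.pyGet? formatted (-1)).getD ""]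
      else formatted
    | none => formatted
  PySem.Str.join " -> " nodes

-- ===== PRECONDITION & SPEC =====
def Spec_str_state_py (state : Int × (List (String × Int × Int × Int))) (max_steps : Option Int) (out : String) : Prop := out = str_state_py_alt state max_steps
instance (state : Int × (List (String × Int × Int × Int))) (max_steps : Option Int) (out : String) : Decidable (Spec_str_state_py state max_steps out) := by unfold Spec_str_state_py; infer_instance

-- ===== CLAIM (what is proved, stated in full; the proofs are below) =====
def Claim_equal_str_state_py : Prop := ∀ (state : Int × (List (String × Int × Int × Int))) (max_steps : Option Int), Dom_str_state_py state max_steps → Spec_str_state_py state max_steps (str_state_py state max_steps)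

-- ===== LEMMAS AND PROOFS =====

theorem pvStepA_fmt (n_steps : Int) (ms? : Option Int) (acc : List String) (b : Bool)
    (i : Int) (x : String × Int × Int × Int)
    (h1 : ¬ (i < n_steps ∧ b = true)) (h2 : pvTrig n_steps ms? i = false) :
    pvStepA n_steps ms? (acc, b) (i, x) = (acc ++ [pvFmt x], b) := by
  simp only [pvStepA, pvFmt]
  rw [if_neg h1, if_neg (by simp [h2])]
  split <;> rfl

theorem pvStepA_skipped (n_steps : Int) (ms? : Option Int) (acc : List String)
    (i : Int) (x : String × Int × Int × Int) (h : i < n_steps) :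
    pvStepA n_steps ms? (acc, true) (i, x) = (acc, true) := by
  simp only [pvStepA]
  rw [if_pos ⟨h, trivial⟩]

-- the trigger never fires and skip is false: the loop just formats every node
theorem pvFoldA_noTrig (n_steps : Int) (ms? : Option Int)
    (l : List (String × Int × Int × Int)) (j : Int) (acc : List String)
    (h : ∀ i, j ≤ i → i < j + l.length → pvTrig n_steps ms? i = false) :
    (PySem.List.enumerate l j).foldl (pvStepA n_steps ms?) (acc, false)
      = (acc ++ l.map pvFmt, false) := by
  induction l generalizing j acc with
  | nil => simp [PySem.List.enumerate_nil]
  | cons x xs ih =>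
    rw [PySem.List.enumerate_cons]
    simp only [List.foldl_cons]
    rw [pvStepA_fmt _ _ _ _ _ _ (by simp) (h j le_rfl (by simp))]
    rw [ih (j + 1) (acc ++ [pvFmt x])
      (fun i h1 h2 => h i (by omega) (by simp at h2 ⊢; omega))]
    simp

-- skip = true: everything before index n - 1 is skipped, the last element formatted
theorem pvFoldA_skip (n : Int) (ms? : Option Int)
    (l : List (String × Int × Int × Int)) (j : Int) (acc : List String)
    (hne : l ≠ []) (hj : j + l.length = n) :
    (PySem.List.enumerate l j).foldl (pvStepA (n - 1) ms?) (acc, true)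
      = (acc ++ [pvFmt (l.getLast hne)], true) := by
  induction l generalizing j acc with
  | nil => exact absurd rfl hne
  | cons x xs ih =>
    rw [PySem.List.enumerate_cons]
    simp only [List.foldl_cons]
    cases xs with
    | nil =>
      -- last element: index j = n - 1
      have hj' : j = n - 1 := by simp at hj; omega
      rw [pvStepA_fmt _ _ _ _ _ _ (by simp; omega)
        (by cases ms? <;> simp [pvTrig]; omega)]
      simp [PySem.List.enumerate_nil, List.getLast]
    | cons y ys =>
      rw [pvStepA_skipped _ _ _ _ _ (by simp at hj; omega)]
      rw [ih (j + 1) acc (List.cons_ne_nil y ys)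
        (by simp only [List.length_cons] at hj ⊢; push_cast at hj ⊢; omega)]
      simp [List.getLast]

theorem str_state_py_eq_alt (state : Int × (List (String × Int × Int × Int)))
    (max_steps : Option Int) :
    str_state_py state max_steps = str_state_py_alt state max_steps := by
  obtain ⟨v0, path⟩ := state
  simp only [str_state_py, str_state_py_alt]
  congr 1
  cases max_steps with
  | none =>
    rw [pvFoldA_noTrig _ none path 0 [] (fun i _ _ => rfl)]
    simp
  | some ms =>
    simp only [List.length_map]
    by_cases htr : max ms 0 < (path.length : Int) - 1
    · -- truncation happens
      rw [if_pos htr]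
      set m : Int := max ms 0 with hm
      have hm0 : 0 ≤ m := le_max_right ms 0
      have hmn : m.toNat < path.length := by omega
      have hdec : path = path.take m.toNat ++ path.drop m.toNat := (List.take_append_drop _ _).symm
      obtain ⟨c, rest, hdrop⟩ : ∃ c rest, path.drop m.toNat = c :: rest := by
        cases hd : path.drop m.toNat with
        | nil => exfalso; have := List.length_drop (l := path) (i := m.toNat); rw [hd] at this; simp at this; omega
        | cons c rest => exact ⟨c, rest, rfl⟩
      have hlen_take : (path.take m.toNat).length = m.toNat := by
        simp; omega
      have henum : PySem.List.enumerate path 0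
          = PySem.List.enumerate (path.take m.toNat) 0
            ++ PySem.List.enumerate (c :: rest) (0 + (path.take m.toNat).length) := by
        conv_lhs => rw [hdec, hdrop]
        rw [PySem.List.enumerate_append]
      rw [henum, List.foldl_append]
      rw [pvFoldA_noTrig _ (some ms) (path.take m.toNat) 0 []
        (by intro i h1 h2; simp only [hlen_take] at h2; simp [pvTrig]; intro ha; omega)]
      rw [PySem.List.enumerate_cons]
      simp only [List.foldl_cons, hlen_take]
      have hrest_len : (m.toNat : Int) + 1 + rest.length = path.length := by
        have h1 : (path.drop m.toNat).length = path.length - m.toNat := by simp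
        rw [hdrop] at h1; simp at h1; omega
      have hrest_ne : rest ≠ [] := by
        intro h; rw [h] at hrest_len; simp at hrest_len; omega
      have hstep : pvStepA ((path.length : Int) - 1) (some ms)
          ((path.take m.toNat).map pvFmt, false) ((0 : Int) + m.toNat, c)
          = ((path.take m.toNat).map pvFmt ++ ["..."], true) := by
        simp only [pvStepA]
        rw [if_neg (by simp), if_pos (by simp [pvTrig]; omega)]
      simp only [List.nil_append]
      rw [hstep]
      rw [pvFoldA_skip (path.length : Int) (some ms) rest ((0 : Int) + m.toNat + 1)
        ((path.take m.toNat).map pvFmt ++ ["..."]) hrest_ne (by omega)]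
      -- now compare with B's slice / last-element expression
      have hslice : PySem.List.slice (path.map pvFmt) none (some m)
          = (path.take m.toNat).map pvFmt := by
        rw [PySem.List.slice_to (path.map pvFmt) hm0, List.map_take]
      have hpe : path ≠ [] := by intro h; rw [h] at hmn; simp at hmn
      have hq : path.getLast? = some (rest.getLast hrest_ne) := by
        conv_lhs => rw [hdec, hdrop]
        rw [List.getLast?_append_of_ne_nil _ (List.cons_ne_nil c rest),
          List.getLast?_eq_some_getLast (List.cons_ne_nil c rest), List.getLast_cons hrest_ne]
      have hlast : (PySem.List.pyGet? (path.map pvFmt) (-1)).getD ""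
          = pvFmt (rest.getLast hrest_ne) := by
        have hne' : path.map pvFmt ≠ [] := by simpa using hpe
        have h1 : 0 < (path.map pvFmt).length := List.length_pos_iff.mpr hne'
        simp only [PySem.List.pyGet?, PySem.List.pyIdx?]
        rw [if_neg (by omega), if_pos (by omega)]
        simp only [Option.bind_some]
        rw [List.getElem?_eq_getElem (by omega)]
        have h3 : path.getLast hpe = rest.getLast hrest_ne :=
          Option.some_injective _ (by rw [← List.getLast?_eq_some_getLast hpe, hq])
        rw [List.getLast_eq_getElem] at h3
        simp only [Option.getD_some, List.getElem_map, List.length_map]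
        rw [← h3]
        norm_num
      rw [hslice, hlast]
    · -- no truncation: the trigger never fires
      rw [if_neg htr]
      rw [pvFoldA_noTrig _ (some ms) path 0 []
        (by intro i h1 h2; simp [pvTrig]; intro ha; simp at h2; omega)]
      simp
-- ===== VERDICT (by name: the statement is the Claim_ definition above) =====
theorem str_state_py_spec : Claim_equal_str_state_py := by
  intro state max_steps _
  unfold Spec_str_state_py
  exact str_state_py_eq_alt state max_steps
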